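-- pv_equiv track=rewrite | github.com/FrancisDShanks/CodingPractice | LeetCode/717. 1-bit and 2-bit Characters/1-bit_and_2-bit_characters.py | isOneBitCharacter
-- ===== SOURCE A (Python) =====
-- def isOneBitCharacter(bits):
--     """
--     :type bits: List[int]
--     :rtype: bool
--     """
--     i = len(bits)-2
--     cnt = 0
--     while i >= 0:
--         if bits[i]==1:
--             cnt += 1
--         else:
--             break
--         i -= 1
--     return cnt % 2 == 0
-- ===== SOURCE B (Python) =====
-- def isOneBitCharacter(bits):
--     if not bits:
--         return True
--     i = 0
--     n = len(bits)
--     while i < n - 1: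
--         i += 2 if bits[i] == 1 else 1
--     return i == n - 1
-- ===== Notes on version B (the rewrite author's own statement) =====
-- stated objective: alternative
-- what changed: Replaces the backward scan that counts trailing ones and tests their parity with the canonical forward greedy parse that consumes two positions after a 1 and one otherwise, returning whether the parse lands exactly on the last index.
import Mathlib
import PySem

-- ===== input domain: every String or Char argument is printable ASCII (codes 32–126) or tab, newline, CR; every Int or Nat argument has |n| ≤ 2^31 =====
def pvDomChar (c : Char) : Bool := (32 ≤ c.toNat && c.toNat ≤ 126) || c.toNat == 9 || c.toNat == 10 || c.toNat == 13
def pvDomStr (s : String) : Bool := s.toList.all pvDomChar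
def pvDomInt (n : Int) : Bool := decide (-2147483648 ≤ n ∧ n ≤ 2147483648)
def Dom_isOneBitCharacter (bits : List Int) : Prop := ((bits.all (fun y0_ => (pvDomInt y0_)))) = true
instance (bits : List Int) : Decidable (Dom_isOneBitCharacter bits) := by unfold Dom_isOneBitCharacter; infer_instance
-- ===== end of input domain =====

-- B replaces A's backward trailing-ones parity count with the canonical forward greedy parse (alternative decomposition, same cost).


-- ===== PORT A =====
-- while i >= 0: if bits[i]==1 then cnt += 1; i -= 1 else break
def aGo (bits : List Int) (i : Int) (cnt : Int) : Int :=
  if _h : 0 ≤ i then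
    if PySem.List.pyGet? bits i = some 1 then aGo bits (i - 1) (cnt + 1) else cnt
  else cnt
termination_by (i + 1).toNat
decreasing_by omega

def isOneBitCharacter (bits : List Int) : Bool :=
  PySem.Int.mod (aGo bits ((bits.length : Int) - 2) 0) 2 == 0

-- ===== PORT B =====
-- while i < n - 1: i += 2 if bits[i] == 1 else 1
def bGo (bits : List Int) (n i : Int) : Int :=
  if _h : i < n - 1 then
    bGo bits n (if PySem.List.pyGet? bits i = some 1 then i + 2 else i + 1)
  else i
termination_by (n - i).toNat
decreasing_by split <;> omega

def isOneBitCharacter_alt (bits : List Int) : Bool :=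
  if bits.isEmpty then true
  else bGo bits (bits.length : Int) 0 == (bits.length : Int) - 1

-- ===== PRECONDITION & SPEC =====
def Spec_isOneBitCharacter (bits : List Int) (out : Bool) : Prop := out = isOneBitCharacter_alt bits
instance (bits : List Int) (out : Bool) : Decidable (Spec_isOneBitCharacter bits out) := by unfold Spec_isOneBitCharacter; infer_instance

-- ===== CLAIM (what is proved, stated in full; the proofs are below) =====
def Claim_equal_isOneBitCharacter : Prop := ∀ (bits : List Int), Dom_isOneBitCharacter bits → Spec_isOneBitCharacter bits (isOneBitCharacter bits)

-- ===== LEMMAS AND PROOFS =====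

-- number of trailing elements equal to 1
def rOnes (l : List Int) : Nat := (l.reverse.takeWhile (fun x => x == 1)).length

-- abstract version of B's parse: consume 2 after a leading 1, else 1; true iff exactly one element remains
def gParse : List Int → Bool
  | [] => false
  | [_] => true
  | a :: b :: rest => if a = 1 then gParse rest else gParse (b :: rest)

lemma rOnes_snoc (l : List Int) (a : Int) :
    rOnes (l ++ [a]) = if a = 1 then rOnes l + 1 else 0 := by
  by_cases h : a = 1 <;> simp [rOnes, h]

lemma rOnes_cons (a : Int) (l : List Int) :
    rOnes (a :: l) = if (l.all (fun x => x == 1)) ∧ a = 1 then l.length + 1 else rOnes l := by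
  induction l using List.reverseRecOn with
  | nil =>
    by_cases h : a = 1 <;> simp [rOnes, h]
  | append_singleton m b ih =>
    rw [show a :: (m ++ [b]) = (a :: m) ++ [b] from rfl, rOnes_snoc, rOnes_snoc, ih]
    by_cases hb : b = 1 <;> by_cases ha : a = 1 <;>
      simp [hb, ha, List.all_append] <;> split_ifs <;> simp_all

lemma rOnes_all_ones (l : List Int) (h : l.all (fun x => x == 1)) : rOnes l = l.length := by
  cases l with
  | nil => rfl
  | cons a t =>
    simp [List.all_eq_true] at h
    rw [rOnes_cons, if_pos ⟨by
      simp only [List.all_eq_true, beq_iff_eq]; exact fun x hx => h.2 x hx, h.1⟩]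
    simp

-- A's loop counts the trailing ones of the first k elements
lemma aGo_eq (bits : List Int) : ∀ (k : Nat) (cnt : Int), k ≤ bits.length →
    aGo bits ((k : Int) - 1) cnt = cnt + (rOnes (bits.take k) : Int) := by
  intro k
  induction k with
  | zero => intro cnt _; rw [aGo]; simp [rOnes]
  | succ k ih =>
    intro cnt hk
    rw [aGo]
    push_cast
    have hklt : k < bits.length := by omega
    have hget : PySem.List.pyGet? bits ((k : Int) + 1 - 1) = bits[k]? := by
      rw [show ((k : Int) + 1 - 1) = (k : Int) from by ring]
      simp [PySem.List.pyGet?_natCast]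
    have htake : bits.take (k + 1) = bits.take k ++ [bits[k]] :=
      List.take_succ_eq_append_getElem hklt
    rw [dif_pos (show (0:Int) ≤ (k:Int) + 1 - 1 from by omega), hget,
      List.getElem?_eq_getElem hklt, htake, rOnes_snoc]
    by_cases h1 : bits[k] = 1
    · rw [if_pos (by simp [h1]), if_pos h1,
        show ((k:Int) + 1 - 1 - 1) = (k:Int) - 1 from by ring, ih (cnt + 1) (by omega)]
      push_cast; ring
    · rw [if_neg (by simp [h1]), if_neg h1]
      simp

-- B's loop decided by the abstract parse of the remaining suffix
lemma bGo_eq (bits : List Int) : ∀ (s : List Int) (i : Nat),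
    bits.drop i = s → i + s.length = bits.length →
    (bGo bits (bits.length : Int) (i : Int) == (bits.length : Int) - 1) = gParse s := by
  intro s
  induction s using gParse.induct with
  | case1 =>
    intro i hdrop hlen
    rw [bGo, dif_neg (by simp at hlen; omega)]
    simp at hlen
    simp [gParse, show (i:Int) ≠ (bits.length:Int) - 1 from by omega]
  | case2 x =>
    intro i hdrop hlen
    rw [bGo, dif_neg (by simp at hlen; omega)]
    simp at hlen
    simp [gParse, show (i:Int) = (bits.length:Int) - 1 from by omega]
  | case3 b rest ih =>
    intro i hdrop hlen
    simp at hlen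
    have hget : PySem.List.pyGet? bits (i : Int) = bits[i]? := by
      simp [PySem.List.pyGet?_natCast]
    have hhead : bits[i]? = some 1 := by
      rw [← List.head?_drop, hdrop]; rfl
    rw [bGo, dif_pos (by omega), hget, hhead, if_pos rfl]
    have hdrop2 : bits.drop (i + 2) = rest := by
      have h2 : bits.drop (i + 2) = (bits.drop i).drop 2 := by
        rw [List.drop_drop]
      rw [h2, hdrop]; rfl
    have := ih (i + 2) hdrop2 (by omega)
    rw [show (i : Int) + 2 = ((i + 2 : Nat) : Int) from by push_cast; ring, this]
    simp [gParse]
  | case4 a b rest ha ih =>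
    intro i hdrop hlen
    simp at hlen
    have hget : PySem.List.pyGet? bits (i : Int) = bits[i]? := by
      simp [PySem.List.pyGet?_natCast]
    have hhead : bits[i]? = some a := by
      rw [← List.head?_drop, hdrop]; rfl
    rw [bGo, dif_pos (by omega), hget, hhead, if_neg (by simp [ha])]
    have hdrop1 : bits.drop (i + 1) = b :: rest := by
      have h2 : bits.drop (i + 1) = (bits.drop i).drop 1 := by rw [List.drop_drop]
      rw [h2, hdrop]; rfl
    have := ih (i + 1) hdrop1 (by simp; omega)
    rw [show (i : Int) + 1 = ((i + 1 : Nat) : Int) from by push_cast; ring, this]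
    simp [gParse, ha]

-- the parse succeeds iff the number of trailing ones before the last element is even
lemma gParse_eq_parity : ∀ s : List Int,
    gParse s = if s = [] then false else decide (rOnes s.dropLast % 2 = 0) := by
  intro s
  induction s using gParse.induct with
  | case1 => rfl
  | case2 x => simp [gParse, rOnes]

  | case3 b rest ih =>
    rw [show gParse (1 :: b :: rest) = gParse rest from by simp [gParse], ih]
    cases rest with
    | nil => simp [List.dropLast, rOnes_cons]
    | cons c t =>
      simp only [if_neg (by simp : (c :: t : List Int) ≠ []),
        if_neg (by simp : ((1:Int) :: b :: c :: t : List Int) ≠ [])]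
      have hdl : ((1:Int) :: b :: c :: t).dropLast = 1 :: b :: (c :: t).dropLast := rfl
      rw [hdl]
      set l := (c :: t).dropLast with hl
      rw [rOnes_cons, rOnes_cons]
      by_cases hall : (b :: l).all (fun x => x == 1)
      · simp only [List.all_cons, Bool.and_eq_true, beq_iff_eq] at hall
        have hlall : l.all (fun x => x == 1) := hall.2
        rw [if_pos (show ((b :: l).all (fun x => x == 1)) ∧ (1:Int) = 1 from
          ⟨by simp only [List.all_cons, Bool.and_eq_true, beq_iff_eq]; exact hall, rfl⟩),
          rOnes_all_ones l hlall]
        simp; omega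
      · rw [if_neg (by rw [not_and_or]; left; exact hall)]
        by_cases hb : l.all (fun x => x == 1) ∧ b = 1
        · exfalso; apply hall; simp only [List.all_cons, Bool.and_eq_true, beq_iff_eq]
          exact ⟨hb.2, hb.1⟩
        · rw [if_neg hb]
  | case4 a b rest ha ih =>
    rw [show gParse (a :: b :: rest) = gParse (b :: rest) from by simp [gParse, ha], ih]
    simp only [if_neg (by simp : (b :: rest : List Int) ≠ []),
      if_neg (by simp : (a :: b :: rest : List Int) ≠ [])]
    have hdl : (a :: b :: rest).dropLast = a :: (b :: rest).dropLast := rfl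
    rw [hdl, rOnes_cons, if_neg (by rw [not_and_or]; right; exact ha)]

lemma main_eq (bits : List Int) : isOneBitCharacter bits = isOneBitCharacter_alt bits := by
  unfold isOneBitCharacter isOneBitCharacter_alt
  cases bits with
  | nil =>
    rw [aGo]; simp [PySem.Int.mod]
  | cons x xs =>
    rw [if_neg (by simp)]
    have hA : aGo (x :: xs) (((x :: xs).length : Int) - 2) 0
        = (rOnes ((x :: xs).take xs.length) : Int) := by
      have h := aGo_eq (x :: xs) xs.length 0 (by simp)
      rw [show (((x :: xs).length : Int) - 2) = (xs.length : Int) - 1 from by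
        simp; ring, h]
      simp
    have hB := bGo_eq (x :: xs) (x :: xs) 0 (by simp) (by simp)
    rw [show ((0:Nat) : Int) = (0 : Int) from rfl] at hB
    rw [hB, gParse_eq_parity, if_neg (by simp), hA]
    have hdl : (x :: xs).dropLast = (x :: xs).take xs.length := by
      rw [List.dropLast_eq_take]; simp
    rw [hdl]
    set m := rOnes ((x :: xs).take xs.length)
    rw [show PySem.Int.mod (m : Int) 2 = ((m % 2 : Nat) : Int) from
      PySem.Int.mod_natCast m 2]
    by_cases h : m % 2 = 0 <;> simp [h] <;> omega

-- ===== VERDICT (by name: the statement is the Claim_ definition above) =====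
theorem isOneBitCharacter_spec : Claim_equal_isOneBitCharacter := by
  intro bits _
  unfold Spec_isOneBitCharacter
  exact main_eq bits
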